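-- pv_equiv track=rewrite | github.com/vldch/electricalOneDiagram | elecOneDirgam/elecOneDirgam.py | grouping_circuits
-- ===== SOURCE A (Python) =====
-- def grouping_circuits(circuits_2,a,b):
-- 	i=0
-- 	k=0
-- 	list_gc=[]
-- 	list2=[]
-- 	for circuit in circuits_2:
-- 		if k==0:
-- 			if i<a:
-- 				list2.append(circuit)
-- 			else:
-- 				k=1
-- 				list_gc.append(list2)
-- 				list2=[]
-- 				list2.append(circuit)
-- 				i=0
-- 		else:
-- 			if i<b:
-- 				list2.append(circuit)
-- 			else:
-- 				list_gc.append(list2)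
-- 				list2=[]
-- 				list2.append(circuit)
-- 				i=0
-- 		i=i+1
-- 	list_gc.append(list2)
-- 	return list_gc
-- ===== SOURCE B (Python) =====
-- def grouping_circuits(circuits_2, a, b):
--     # slice-based: first group is circuits_2[:a2], then size-b2 slices of the rest
--     a2 = max(a, 0)
--     b2 = max(b, 1)
--     groups = [circuits_2[:a2]]
--     rest = circuits_2[a2:]
--     while rest:
--         groups.append(rest[:b2])
--         rest = rest[b2:]
--     return groups
-- ===== Notes on version B (the rewrite author's own statement) =====
-- stated objective: simpler
-- what changed: Replaced A's per-element state machine (counter i, phase flag k, flush-on-counter==limit) by slicing: the first group is circuits_2[:max(a,0)] and the rest is cut into max(b,1)-sized slices in a short while loop.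
import Mathlib
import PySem

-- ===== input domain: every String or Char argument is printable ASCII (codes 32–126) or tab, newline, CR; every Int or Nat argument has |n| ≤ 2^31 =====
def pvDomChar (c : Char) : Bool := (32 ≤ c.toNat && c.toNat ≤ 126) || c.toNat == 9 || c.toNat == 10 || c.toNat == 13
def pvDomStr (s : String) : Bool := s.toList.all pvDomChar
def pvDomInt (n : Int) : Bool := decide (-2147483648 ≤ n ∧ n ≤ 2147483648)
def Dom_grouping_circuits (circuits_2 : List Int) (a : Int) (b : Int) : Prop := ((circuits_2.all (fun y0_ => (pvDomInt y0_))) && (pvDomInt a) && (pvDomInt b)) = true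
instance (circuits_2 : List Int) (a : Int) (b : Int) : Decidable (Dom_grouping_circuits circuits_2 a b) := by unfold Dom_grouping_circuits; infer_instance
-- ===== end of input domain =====

-- B replaces A's per-element counter/flush state machine by slicing: first group circuits_2[:max(a,0)],
-- then size-max(b,1) slices of the rest (objective: simpler).

-- ===== PORT A =====
-- the for-loop of A, state (i, k, list_gc, list2); after the loop the final `list_gc.append(list2)`
def pvLoopA (a b : Int) (xs : List Int) (i k : Int) (list_gc : List (List Int)) (list2 : List Int) : List (List Int) :=
  match xs with
  | [] => list_gc ++ [list2]
  | c :: rest =>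
    if k = 0 then
      if i < a then pvLoopA a b rest (i + 1) k list_gc (list2 ++ [c])
      else pvLoopA a b rest (0 + 1) 1 (list_gc ++ [list2]) [c]
    else
      if i < b then pvLoopA a b rest (i + 1) k list_gc (list2 ++ [c])
      else pvLoopA a b rest (0 + 1) k (list_gc ++ [list2]) [c]

def grouping_circuits (circuits_2 : List Int) (a : Int) (b : Int) : List (List Int) :=
  pvLoopA a b circuits_2 0 0 [] []

-- ===== PORT B =====
-- the while-loop of B: append rest[:b2] and continue with rest[b2:]; b2 ≥ 1 always
-- (rest[:b2] with b2 ≥ 1 on nonempty rest = x :: t.take (b2-1), rest[b2:] = t.drop (b2-1))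
def pvChunkLoop (b2 : Nat) (rest : List Int) (groups : List (List Int)) : List (List Int) :=
  match rest with
  | [] => groups
  | x :: t => pvChunkLoop b2 (t.drop (b2 - 1)) (groups ++ [x :: t.take (b2 - 1)])
termination_by rest.length
decreasing_by simp

def grouping_circuits_alt (circuits_2 : List Int) (a : Int) (b : Int) : List (List Int) :=
  let a2 : Nat := (max a 0).toNat
  let b2 : Nat := (max b 1).toNat
  pvChunkLoop b2 (circuits_2.drop a2) [circuits_2.take a2]

-- ===== PRECONDITION & SPEC =====
def Spec_grouping_circuits (circuits_2 : List Int) (a : Int) (b : Int) (out : List (List Int)) : Prop := out = grouping_circuits_alt circuits_2 a b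
instance (circuits_2 : List Int) (a : Int) (b : Int) (out : List (List Int)) : Decidable (Spec_grouping_circuits circuits_2 a b out) := by unfold Spec_grouping_circuits; infer_instance

-- ===== CLAIM (what is proved, stated in full; the proofs are below) =====
def Claim_equal_grouping_circuits : Prop := ∀ (circuits_2 : List Int) (a : Int) (b : Int), Dom_grouping_circuits circuits_2 a b → Spec_grouping_circuits circuits_2 a b (grouping_circuits circuits_2 a b)

-- ===== LEMMAS AND PROOFS =====

-- non-accumulator form of B's chunking, for the induction
def pvChunks (k : Nat) (xs : List Int) : List (List Int) :=
  match xs with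
  | [] => []
  | x :: t => (x :: t.take k) :: pvChunks k (t.drop k)
termination_by xs.length
decreasing_by simp

theorem pvChunks_cons (k : Nat) (x : Int) (t : List Int) :
    pvChunks k (x :: t) = (x :: t.take k) :: pvChunks k (t.drop k) := by
  rw [pvChunks.eq_def]

theorem pvChunkLoop_eq_aux (b2 : Nat) : ∀ (n : Nat) (rest : List Int), rest.length ≤ n →
    ∀ (gs : List (List Int)), pvChunkLoop b2 rest gs = gs ++ pvChunks (b2 - 1) rest := by
  intro n
  induction n with
  | zero =>
    intro rest h gs
    have : rest = [] := List.length_eq_zero_iff.mp (Nat.le_zero.mp h)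
    subst this; rw [pvChunkLoop.eq_def, pvChunks.eq_def]; simp
  | succ m ih =>
    intro rest h gs
    match rest with
    | [] => rw [pvChunkLoop.eq_def, pvChunks.eq_def]; simp
    | x :: t =>
      rw [pvChunkLoop.eq_def]
      simp only []
      rw [pvChunks_cons, ih (t.drop (b2 - 1)) (by simp at h ⊢; omega)]
      simp

theorem pvChunkLoop_eq (b2 : Nat) (rest : List Int) (gs : List (List Int)) :
    pvChunkLoop b2 rest gs = gs ++ pvChunks (b2 - 1) rest :=
  pvChunkLoop_eq_aux b2 rest.length rest le_rfl gs

-- phase 1 of A's loop (k = 1): i equals list2.length, groups of size max(b,1)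
theorem pvPhase1 (a b : Int) : ∀ (xs cur : List Int) (acc : List (List Int)),
    1 ≤ cur.length → cur.length ≤ (max b 1).toNat →
    pvLoopA a b xs (cur.length : Int) 1 acc cur =
      acc ++ (cur ++ xs.take ((max b 1).toNat - cur.length)) ::
        pvChunks ((max b 1).toNat - 1) (xs.drop ((max b 1).toNat - cur.length)) := by
  intro xs
  induction xs with
  | nil => intro cur acc _ _; rw [pvLoopA.eq_def, pvChunks.eq_def]; simp
  | cons x t ih =>
    intro cur acc h1 h2
    rw [pvLoopA.eq_def]
    simp only [one_ne_zero, if_false]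
    by_cases h : cur.length < (max b 1).toNat
    · have hb : (cur.length : Int) < b := by omega
      rw [if_pos hb]
      have := ih (cur ++ [x]) acc (by simp) (by simp only [List.length_append, List.length_singleton]; omega)
      simp only [List.length_append, List.length_singleton] at this
      push_cast at this ⊢
      rw [this]
      have ht : (max b 1).toNat - cur.length = ((max b 1).toNat - (cur.length + 1)) + 1 := by omega
      rw [ht]
      simp [List.take_succ_cons, List.drop_succ_cons]
    · have hb : ¬ ((cur.length : Int) < b) := by omega
      rw [if_neg hb]
      have := ih [x] (acc ++ [cur]) (by simp) (by simp only [List.length_singleton]; omega)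
      simp only [List.length_singleton, Nat.cast_one] at this
      rw [show ((0 : Int) + 1) = 1 by ring, this]
      have h0 : (max b 1).toNat - cur.length = 0 := by omega
      rw [h0]
      simp [pvChunks_cons]

-- phase 0 of A's loop (k = 0): first group fills to max(a,0) elements
theorem pvPhase0 (a b : Int) : ∀ (xs cur : List Int) (acc : List (List Int)),
    pvLoopA a b xs (cur.length : Int) 0 acc cur =
      acc ++ (cur ++ xs.take ((max a 0).toNat - cur.length)) ::
        pvChunks ((max b 1).toNat - 1) (xs.drop ((max a 0).toNat - cur.length)) := by
  intro xs
  induction xs with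
  | nil => intro cur acc; rw [pvLoopA.eq_def, pvChunks.eq_def]; simp
  | cons x t ih =>
    intro cur acc
    rw [pvLoopA.eq_def]
    simp only [reduceIte]
    by_cases h : cur.length < (max a 0).toNat
    · have ha : (cur.length : Int) < a := by omega
      rw [if_pos ha]
      have := ih (cur ++ [x]) acc
      simp only [List.length_append, List.length_singleton] at this
      push_cast at this ⊢
      rw [this]
      have ht : (max a 0).toNat - cur.length = ((max a 0).toNat - (cur.length + 1)) + 1 := by omega
      rw [ht]
      simp [List.take_succ_cons, List.drop_succ_cons]
    · have ha : ¬ ((cur.length : Int) < a) := by omega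
      rw [if_neg ha]
      have := pvPhase1 a b t [x] (acc ++ [cur]) (by simp) (by simp only [List.length_singleton]; omega)
      simp only [List.length_singleton, Nat.cast_one] at this
      rw [show ((0 : Int) + 1) = 1 by ring, this]
      have h0 : (max a 0).toNat - cur.length = 0 := by omega
      rw [h0]
      simp [pvChunks_cons]

-- ===== VERDICT (by name: the statement is the Claim_ definition above) =====
theorem grouping_circuits_spec : Claim_equal_grouping_circuits := by
  intro xs a b _
  unfold Spec_grouping_circuits grouping_circuits grouping_circuits_alt
  have := pvPhase0 a b xs [] []
  simp only [List.length_nil, Nat.cast_zero, List.nil_append, Nat.sub_zero] at this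
  rw [this, pvChunkLoop_eq]
  simp
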